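-- pv_equiv track=rewrite | github.com/jonddeck/Sorting-Algorithms | Overview/all_sorts_visualizer.py | track_radix
-- ===== SOURCE A (Python) =====
-- def track_radix(arr):
--     a = list(arr)
--     steps = [a.copy()]
--     highlights = [[]]
--     if not a:
--         return steps, highlights
--     m = max(a)
--     exp = 1
--     while m // exp > 0:
--         buckets = [[] for _ in range(10)]
--         for v in a:
--             buckets[(v // exp) % 10].append(v)
--         a = [v for b in buckets for v in b]
--         steps.append(a.copy())
--         highlights.append(list(range(len(a))))
--         exp *= 10
--     return steps, highlights
-- ===== SOURCE B (Python) =====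
-- def track_radix(arr):
--     a = list(arr)
--     if not a:
--         return [a], [[]]
--     m = max(a)
--
--     def go(xs, exp):
--         if m // exp <= 0:
--             return [], []
--         ys = sorted(xs, key=lambda v: (v // exp) % 10)
--         s, h = go(ys, exp * 10)
--         return [ys] + s, [list(range(len(ys)))] + h
--
--     s, h = go(a, 1)
--     return [a] + s, [[]] + h
-- ===== Notes on version B (the rewrite author's own statement) =====
-- stated objective: simpler
-- what changed: Each digit pass is Python's built-in stable sorted() keyed by the current digit instead of distributing into ten bucket lists and concatenating, and the while-loop with snapshot accumulators is replaced by a recursive helper that builds the pass lists front-to-back.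
import Mathlib
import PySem

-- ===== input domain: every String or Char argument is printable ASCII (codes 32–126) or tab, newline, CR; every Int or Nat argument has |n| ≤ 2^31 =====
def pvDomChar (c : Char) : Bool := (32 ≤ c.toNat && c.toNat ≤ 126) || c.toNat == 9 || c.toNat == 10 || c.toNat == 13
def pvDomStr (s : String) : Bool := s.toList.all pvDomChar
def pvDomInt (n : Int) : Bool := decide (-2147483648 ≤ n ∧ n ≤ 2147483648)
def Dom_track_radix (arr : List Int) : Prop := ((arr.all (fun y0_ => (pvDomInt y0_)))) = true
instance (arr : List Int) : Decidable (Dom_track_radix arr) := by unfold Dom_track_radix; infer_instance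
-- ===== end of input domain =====

-- B does each digit pass with Python's stable sorted() keyed by the digit, and builds the
-- snapshot lists front-to-back by recursion instead of A's while-loop with accumulators;
-- same values everywhere.

-- ===== PORT A =====
-- termination of the while loop: m // exp shrinks when exp is multiplied by 10 (cited by both ports' decreasing_by)
lemma pvDec (m exp : Int) (hexp : 0 < exp) (h : 0 < PySem.Int.floordiv m exp) :
    (PySem.Int.floordiv m (exp * 10)).toNat < (PySem.Int.floordiv m exp).toNat := by
  rw [PySem.Int.floordiv_eq_ediv_of_pos hexp] at h
  rw [PySem.Int.floordiv_eq_ediv_of_pos hexp, PySem.Int.floordiv_eq_ediv_of_pos (by positivity)]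
  rw [← Int.ediv_ediv_of_nonneg (le_of_lt hexp)]
  generalize m / exp = q at h ⊢
  omega

-- one pass of A: distribute into 10 buckets (buckets[(v//exp)%10].append(v)), then concatenate
def passA (exp : Int) (a : List Int) : List Int :=
  let buckets0 : List (List Int) := (PySem.List.pyRange 0 10 1).map (fun _ => ([] : List Int))
  let buckets := a.foldl
    (fun bs v => bs.modify (PySem.Int.mod (PySem.Int.floordiv v exp) 10).toNat (fun b => b ++ [v])) buckets0
  buckets.foldl (fun acc b => acc ++ b) []

-- while m // exp > 0: run one bucket pass; append snapshot to the accumulators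
def trackLoopA (m exp : Int) (a : List Int) (steps highlights : List (List Int))
    (hexp : 0 < exp) : List (List Int) × List (List Int) :=
  if h : 0 < PySem.Int.floordiv m exp then
    let a' := passA exp a
    trackLoopA m (exp * 10) a' (steps ++ [a']) (highlights ++ [PySem.List.pyRange 0 a'.length 1])
      (by positivity)
  else (steps, highlights)
termination_by (PySem.Int.floordiv m exp).toNat
decreasing_by
  exact pvDec m exp hexp h

def track_radix (arr : List Int) : List (List Int) × List (List Int) :=
  let a := arr
  let steps := [a]
  let highlights : List (List Int) := [[]]
  if a = [] then (steps, highlights)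
  else
    let m := ((PySem.List.max? a (fun x => x)).getD 0)      -- a ≠ [], so max? = some (Python max(a))
    trackLoopA m 1 a steps highlights (by norm_num)

-- ===== PORT B =====
-- go(xs, exp): if m // exp <= 0 return ([], []); else one stable sort keyed by the current
-- digit, recurse with exp*10, and cons this pass's snapshot and highlight onto the results
def goB (m exp : Int) (xs : List Int) (hexp : 0 < exp) : List (List Int) × List (List Int) :=
  if h : 0 < PySem.Int.floordiv m exp then
    let ys := PySem.List.sorted xs (fun v => PySem.Int.mod (PySem.Int.floordiv v exp) 10)
    let r := goB m (exp * 10) ys (by positivity)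
    (ys :: r.1, PySem.List.pyRange 0 ys.length 1 :: r.2)
  else ([], [])
termination_by (PySem.Int.floordiv m exp).toNat
decreasing_by
  exact pvDec m exp hexp h

def track_radix_alt (arr : List Int) : List (List Int) × List (List Int) :=
  let a := arr
  if a = [] then ([a], [[]])
  else
    let m := ((PySem.List.max? a (fun x => x)).getD 0)
    let r := goB m 1 a (by norm_num)
    (a :: r.1, [] :: r.2)

-- ===== PRECONDITION & SPEC =====
def Spec_track_radix (arr : List Int) (out : List (List Int) × List (List Int)) : Prop := out = track_radix_alt arr
instance (arr : List Int) (out : List (List Int) × List (List Int)) : Decidable (Spec_track_radix arr out) := by unfold Spec_track_radix; infer_instance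

-- ===== CLAIM =====
def Claim_equal_track_radix : Prop := ∀ (arr : List Int), Dom_track_radix arr → Spec_track_radix arr (track_radix arr)

-- ===== LEMMAS AND PROOFS =====

-- the digit of v for the current exp, as A computes it (a Nat index in [0,10))
def pvDig (exp v : Int) : Nat := (PySem.Int.mod (PySem.Int.floordiv v exp) 10).toNat

lemma pvDig_nonneg (exp v : Int) : 0 ≤ PySem.Int.mod (PySem.Int.floordiv v exp) 10 := by
  have h := PySem.Int.mod_eq_emod_of_pos (a := PySem.Int.floordiv v exp) (b := 10) (by norm_num)
  rw [h]
  exact Int.emod_nonneg _ (by norm_num)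

-- invariant of A's distribution loop: bucket d holds its initial content followed by the matching elements in order
lemma foldl_modify_buckets (exp : Int) (a : List Int) (bs : List (List Int)) (hbs : bs.length = 10) :
    a.foldl (fun bs v => bs.modify (pvDig exp v) (fun b => b ++ [v])) bs
      = (List.range 10).map (fun d => bs.getD d [] ++ a.filter (fun v => pvDig exp v == d)) := by
  induction a generalizing bs with
  | nil =>
      simp only [List.foldl_nil, List.filter_nil, List.append_nil]
      apply List.ext_getElem
      · simp [hbs]
      · intro i hi _
        simp [hbs] at hi
        simp [List.getD_eq_getElem?_getD, hbs, hi]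
  | cons v a ih =>
      simp only [List.foldl_cons]
      rw [ih _ (by simp [hbs])]
      apply List.ext_getElem
      · simp
      · intro i h1 h2
        simp only [List.getElem_map, List.getElem_range]
        have hi : i < 10 := by simpa using h1
        rw [List.getD_eq_getElem?_getD, List.getD_eq_getElem?_getD]
        rw [List.getElem?_modify]
        have hilt : i < bs.length := by omega
        rw [List.getElem?_eq_getElem hilt]
        by_cases hd : pvDig exp v = i
        · simp [hd]
        · have : (pvDig exp v == i) = false := by simp [hd]
          simp [hd, this]

-- A's and B's filter predicates agree on every element for each digit d of range(10)
lemma dig_beq (exp v : Int) (k : Nat) :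
    (pvDig exp v == k) = (PySem.Int.mod (PySem.Int.floordiv v exp) 10 == (k : Int)) := by
  have h0 := pvDig_nonneg exp v
  unfold pvDig
  rw [Bool.eq_iff_iff, beq_iff_eq, beq_iff_eq]
  omega

-- insertBy passes over a block none of whose elements trigger `before`
lemma insertBy_pass (bf : Int → Int → Bool) (x : Int) (g t : List Int)
    (h : ∀ y ∈ g, bf x y = false) :
    PySem.List.insertBy bf x (g ++ t) = g ++ PySem.List.insertBy bf x t := by
  induction g with
  | nil => simp
  | cons y g ih =>
      simp only [List.cons_append, PySem.List.insertBy]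
      rw [h y (by simp)]
      simp only [Bool.false_eq_true, if_false, List.cons.injEq, true_and]
      exact ih (fun z hz => h z (by simp [hz]))

-- insertBy puts x in front when every element triggers `before`
lemma insertBy_front (bf : Int → Int → Bool) (x : Int) (t : List Int)
    (h : ∀ y ∈ t, bf x y = true) :
    PySem.List.insertBy bf x t = x :: t := by
  cases t with
  | nil => rfl
  | cons y ys => simp [PySem.List.insertBy, h y (by simp)]

-- inserting x into a concatenation of strictly-increasing key groups appends it to its own group
lemma insertBy_flatMap (key : Int → Int) (x : Int) (ds : List Int)
    (G : Int → List Int)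
    (hsor : ds.Pairwise (· < ·)) (hmem : key x ∈ ds)
    (hG : ∀ d ∈ ds, ∀ y ∈ G d, key y = d) :
    PySem.List.insertBy (fun a b => decide (key a < key b)) x (ds.flatMap G)
      = ds.flatMap (fun d => G d ++ if key x = d then [x] else []) := by
  induction ds with
  | nil => cases hmem
  | cons d ds ih =>
      have hGd : ∀ y ∈ G d, key y = d := hG d (by simp)
      have hlt : ∀ d' ∈ ds, d < d' := (List.pairwise_cons.mp hsor).1
      simp only [List.flatMap_cons]
      by_cases hk : key x = d
      · -- pass over G d (keys = d = key x, not <), then x goes in front of the rest (all keys > d)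
        rw [insertBy_pass _ _ _ _ (fun y hy => by simp [hGd y hy, hk])]
        rw [insertBy_front _ _ _ (fun y hy => by
          rcases List.mem_flatMap.mp hy with ⟨d', hd', hy'⟩
          simp [hG d' (by simp [hd']) y hy', hk, hlt d' hd'])]
        have : ds.flatMap (fun d => G d ++ if key x = d then [x] else []) = ds.flatMap G := by
          apply List.flatMap_congr
          intro d' hd'
          have : key x ≠ d' := by have := hlt d' hd'; omega
          simp [this]
        rw [this, if_pos hk]
        simp
      · -- key x ∈ ds and d < key x: pass over G d and recurse
        have hmem' : key x ∈ ds := by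
          rcases List.mem_cons.mp hmem with h | h
          · exact absurd h hk
          · exact h
        have hdlt : d < key x := hlt _ hmem'
        rw [insertBy_pass _ _ _ _ (fun y hy => by simp [hGd y hy]; omega)]
        rw [ih (List.pairwise_cons.mp hsor).2 hmem' (fun d' hd' => hG d' (by simp [hd']))]
        rw [if_neg hk]
        simp

-- Python's stable sort by digit is the concatenation, digit by digit, of the stable filters
lemma sorted_flatMap (exp : Int) (a : List Int) :
    PySem.List.sorted a (fun v => PySem.Int.mod (PySem.Int.floordiv v exp) 10)
      = (List.map Int.ofNat (List.range 10)).flatMap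
          (fun d => a.filter (fun v => PySem.Int.mod (PySem.Int.floordiv v exp) 10 == d)) := by
  have hm : ∀ v : Int, PySem.Int.mod (PySem.Int.floordiv v exp) 10 = PySem.Int.floordiv v exp % 10 :=
    fun v => PySem.Int.mod_eq_emod_of_pos (by norm_num)
  simp only [hm]
  induction a using List.reverseRecOn with
  | nil =>
      rw [PySem.List.sorted_eq_foldl_insertBy]
      simp
  | append_singleton a x ih =>
      rw [PySem.List.sorted_eq_foldl_insertBy, List.foldl_append, ← PySem.List.sorted_eq_foldl_insertBy,
        List.foldl_cons, List.foldl_nil, ih]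
      have h0 : 0 ≤ PySem.Int.floordiv x exp % 10 := Int.emod_nonneg _ (by norm_num)
      have h10 : PySem.Int.floordiv x exp % 10 < 10 := Int.emod_lt_of_pos _ (by norm_num)
      rw [insertBy_flatMap (fun v => PySem.Int.floordiv v exp % 10) x _ _
        (by
          rw [List.pairwise_map]
          exact (List.pairwise_lt_range).imp (fun h => Int.ofNat_lt.mpr h))
        (List.mem_map.mpr ⟨(PySem.Int.floordiv x exp % 10).toNat,
          List.mem_range.mpr (by omega), by simpa using Int.toNat_of_nonneg h0⟩)
        (by
          intro d _ y hy
          have := List.of_mem_filter hy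
          simpa using this)]
      apply List.flatMap_congr
      intro d _
      rw [List.filter_append]
      congr 1
      simp only [List.filter_cons, List.filter_nil]
      by_cases h : PySem.Int.floordiv x exp % 10 = d <;> simp [h]

-- one pass of A equals one stable sort of B
lemma pass_eq (exp : Int) (a : List Int) :
    passA exp a = PySem.List.sorted a (fun v => PySem.Int.mod (PySem.Int.floordiv v exp) 10) := by
  simp only [passA]
  have hb0 : ((PySem.List.pyRange 0 10 1).map (fun _ => ([] : List Int))).length = 10 := by
    simp [PySem.List.length_pyRange_one]
  have hL := foldl_modify_buckets exp a _ hb0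
  simp only [pvDig] at hL
  rw [hL]
  have hflat : ∀ (l : List (List Int)), l.foldl (fun acc b => acc ++ b) [] = l.flatMap id :=
    fun l => by simpa using PySem.List.foldl_append_eq_flatMap (l := l) (g := id) (acc := [])
  rw [hflat, List.flatMap_map, sorted_flatMap, List.flatMap_map]
  apply List.flatMap_congr
  intro d hd
  have hd10 : d < 10 := by simpa using hd
  have hempty : (List.map (fun _ => ([] : List Int)) (PySem.List.pyRange 0 10 1)).getD d [] = [] := by
    rw [List.getD_eq_getElem?_getD, List.getElem?_map]
    cases (PySem.List.pyRange 0 10 1)[d]? <;> simp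
  simp only [id_eq, hempty, List.nil_append]
  apply List.filter_congr
  intro v _
  exact dig_beq exp v d

-- A's accumulator loop equals the accumulators prepended to B's recursively built lists
lemma loopA_eq_go_aux (n : Nat) : ∀ (m exp : Int) (a : List Int) (st hl : List (List Int)) (hexp : 0 < exp),
    (PySem.Int.floordiv m exp).toNat ≤ n →
    trackLoopA m exp a st hl hexp = (st ++ (goB m exp a hexp).1, hl ++ (goB m exp a hexp).2) := by
  induction n with
  | zero =>
      intro m exp a st hl hexp hn
      rw [trackLoopA, goB]
      have hc : ¬ 0 < PySem.Int.floordiv m exp := by omega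
      rw [dif_neg hc, dif_neg hc]
      simp
  | succ n ih =>
      intro m exp a st hl hexp hn
      rw [trackLoopA, goB]
      by_cases hc : 0 < PySem.Int.floordiv m exp
      · rw [dif_pos hc, dif_pos hc]
        simp only [pass_eq]
        rw [ih _ _ _ _ _ _ (by have := pvDec m exp hexp hc; omega)]
        simp
      · rw [dif_neg hc, dif_neg hc]
        simp

lemma loopA_eq_go (m exp : Int) (a : List Int) (st hl : List (List Int)) (hexp : 0 < exp) :
    trackLoopA m exp a st hl hexp = (st ++ (goB m exp a hexp).1, hl ++ (goB m exp a hexp).2) :=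
  loopA_eq_go_aux (PySem.Int.floordiv m exp).toNat m exp a st hl hexp le_rfl

-- ===== VERDICT (by name: the statement is the Claim_ definition above) =====
theorem track_radix_spec : Claim_equal_track_radix := by
  intro arr _
  unfold Spec_track_radix track_radix track_radix_alt
  by_cases h : arr = []
  · simp only [h, if_true]
  · simp only [h, if_false, loopA_eq_go]
    simp
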